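-- pv_equiv track=rewrite | github.com/shaguniitb/politeness | code/blogArff.py | checkInListLines
-- ===== SOURCE A (Python) =====
-- def checkInListLines(word_list, request):
--     request = request.lower()
--     lines = request.split("\\r?\\n")
--     count = 0
--     for line in lines:
--         line = line.strip()
--         for listItem in word_list:
--             listItem = listItem.lower()
--             if (line.startswith(listItem)):
--                 count += 1
--     return count
-- ===== SOURCE B (Python) =====
-- def checkInListLines(word_list, request):
--     # Alternative: a multiplicity table of the lowered words, looked up on
--     # each line's prefixes up to the longest word's length.
--     freq = {}
--     maxlen = 0
--     for w in word_list:
--         w = w.lower()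
--         freq[w] = freq.get(w, 0) + 1
--         if len(w) > maxlen:
--             maxlen = len(w)
--     total = 0
--     for line in request.lower().split("\\r?\\n"):
--         line = line.strip()
--         for l in range(min(maxlen, len(line)) + 1):
--             total += freq.get(line[:l], 0)
--     return total
-- ===== Notes on version B (the rewrite author's own statement) =====
-- stated objective: alternative
-- what changed: B builds a frequency dict of the lowered words once and, per line, sums lookups of the line's prefixes up to the longest word length, instead of testing every word against every line with startswith.
import Mathlib
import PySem

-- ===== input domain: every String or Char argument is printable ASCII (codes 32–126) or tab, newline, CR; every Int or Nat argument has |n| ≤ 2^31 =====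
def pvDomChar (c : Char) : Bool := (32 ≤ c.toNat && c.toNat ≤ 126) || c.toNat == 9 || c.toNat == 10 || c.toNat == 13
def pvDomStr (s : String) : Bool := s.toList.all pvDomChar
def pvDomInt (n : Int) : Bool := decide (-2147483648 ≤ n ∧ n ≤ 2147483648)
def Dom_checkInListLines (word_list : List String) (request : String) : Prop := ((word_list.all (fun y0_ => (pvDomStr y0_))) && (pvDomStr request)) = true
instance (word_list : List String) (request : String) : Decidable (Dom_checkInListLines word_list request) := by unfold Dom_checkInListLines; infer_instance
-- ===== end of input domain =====

-- B replaces the per-line scan over word_list by one frequency dict of the lowered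
-- words, looked up on each line's prefixes up to the longest word length (objective: alternative).

-- ===== PORT A =====
def checkInListLines (word_list : List String) (request : String) : Int :=
  let request := PySem.Chars.lower request.toList
  let lines := PySem.Chars.splitOn request "\\r?\\n".toList
  lines.foldl (fun count line =>
    word_list.foldl (fun count listItem =>
      if PySem.Chars.startswith (PySem.Chars.strip line) (PySem.Chars.lower listItem.toList)
      then count + 1 else count) count) 0

-- ===== PORT B =====
def checkInListLines_alt (word_list : List String) (request : String) : Int :=
  let fm : PySem.Dict (List Char) Int × Int := word_list.foldl
    (fun s w =>
      (s.1.insert (PySem.Chars.lower w.toList) (s.1.getD (PySem.Chars.lower w.toList) 0 + 1),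
       if (PySem.Chars.len (PySem.Chars.lower w.toList) : Int) > s.2
       then (PySem.Chars.len (PySem.Chars.lower w.toList) : Int) else s.2))
    (PySem.Dict.empty, 0)
  (PySem.Chars.splitOn (PySem.Chars.lower request.toList) "\\r?\\n".toList).foldl
    (fun total line =>
      (PySem.List.pyRange 0 (min fm.2 (PySem.Chars.len (PySem.Chars.strip line) : Int) + 1) 1).foldl
        (fun total l => total
          + fm.1.getD (PySem.Chars.slice (PySem.Chars.strip line) none (some l)) 0) total)
    0

-- ===== PRECONDITION & SPEC =====
def Spec_checkInListLines (word_list : List String) (request : String) (out : Int) : Prop := out = checkInListLines_alt word_list request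
instance (word_list : List String) (request : String) (out : Int) : Decidable (Spec_checkInListLines word_list request out) := by unfold Spec_checkInListLines; infer_instance

-- ===== CLAIM (what is proved, stated in full; the proofs are below) =====
def Claim_equal_checkInListLines : Prop := ∀ (word_list : List String) (request : String), Dom_checkInListLines word_list request → Spec_checkInListLines word_list request (checkInListLines word_list request)

-- ===== LEMMAS AND PROOFS =====

-- sum over prefix lengths 0..n of "take k = a" is the indicator of "a prefixes s with length ≤ n"
lemma pv_single (s a : List Char) : ∀ (n : Nat), n ≤ s.length →
    ((List.range (n+1)).map (fun k => if s.take k = a then (1 : Int) else 0)).sum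
      = if a <+: s ∧ a.length ≤ n then 1 else 0 := by
  intro n
  induction n with
  | zero =>
    intro _
    rw [List.range_one]
    simp only [List.map_cons, List.map_nil, List.sum_cons, List.sum_nil,
      List.take_zero, add_zero]
    by_cases h : a = []
    · subst h; simp
    · rw [if_neg (fun hh => h hh.symm),
        if_neg (fun hh => h (List.length_eq_zero_iff.mp (Nat.le_zero.mp hh.2)))]
  | succ n ih =>
    intro hle
    have hn : n ≤ s.length := Nat.le_of_succ_le hle
    rw [List.range_succ, List.map_append, List.sum_append, ih hn]
    simp only [List.map_cons, List.map_nil, List.sum_cons, List.sum_nil, add_zero]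
    by_cases htake : s.take (n+1) = a
    · have hpre : a <+: s := htake ▸ List.take_prefix (n+1) s
      have hlen : a.length = n + 1 := by
        rw [← htake, List.length_take]; omega
      rw [if_pos htake, if_neg (by omega : ¬ (a <+: s ∧ a.length ≤ n)),
        if_pos ⟨hpre, by omega⟩]
      simp
    · rw [if_neg htake]
      by_cases hpre : a <+: s
      · by_cases hal : a.length ≤ n
        · rw [if_pos ⟨hpre, hal⟩, if_pos ⟨hpre, by omega⟩]; simp
        · have : ¬ (a.length ≤ n + 1) := by
            intro h
            have : a.length = n + 1 := by omega
            refine htake ?_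
            have hta := (List.prefix_iff_eq_take.mp hpre).symm
            rw [this] at hta
            exact hta
          rw [if_neg (by tauto), if_neg (by tauto)]; simp
      · rw [if_neg (by tauto), if_neg (by tauto)]; simp

-- summing multiplicities of the prefixes of s in L counts the members of L that prefix s
lemma pv_core (L : List (List Char)) (s : List Char) (n : Nat)
    (hns : n ≤ s.length) (hM : ∀ w ∈ L, w <+: s → w.length ≤ n) :
    ((List.range (n+1)).map (fun k => (List.count (s.take k) L : Int))).sum
      = (L.countP (fun w => PySem.Chars.startswith s w) : Int) := by
  induction L with
  | nil => simp
  | cons a L ih =>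
    have hsplit : ∀ k : Nat, (List.count (s.take k) (a :: L) : Int)
        = (List.count (s.take k) L : Int) + (if s.take k = a then (1 : Int) else 0) := by
      intro k
      rw [List.count_cons]
      push_cast
      by_cases h : s.take k = a
      · simp [h]
      · simp [h, Ne.symm h]
    calc ((List.range (n+1)).map (fun k => (List.count (s.take k) (a :: L) : Int))).sum
        = ((List.range (n+1)).map (fun k => (List.count (s.take k) L : Int)
            + (if s.take k = a then (1 : Int) else 0))).sum := by
          congr 1; exact List.map_congr_left (fun k _ => hsplit k)
      _ = ((List.range (n+1)).map (fun k => (List.count (s.take k) L : Int))).sum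
            + ((List.range (n+1)).map (fun k => if s.take k = a then (1 : Int) else 0)).sum := by
          rw [PySem.List.sum_map_add_int]
      _ = (L.countP (fun w => PySem.Chars.startswith s w) : Int)
            + (if a <+: s ∧ a.length ≤ n then 1 else 0) := by
          rw [ih (fun w hw => hM w (List.mem_cons_of_mem a hw)), pv_single s a n hns]
      _ = ((a :: L).countP (fun w => PySem.Chars.startswith s w) : Int) := by
          rw [List.countP_cons]
          by_cases hpre : a <+: s
          · rw [if_pos ⟨hpre, hM a List.mem_cons_self hpre⟩,
              if_pos ((PySem.Chars.startswith_iff s a).mpr hpre)]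
            push_cast; ring
          · rw [if_neg (by tauto),
              if_neg (by simpa using (fun h => hpre ((PySem.Chars.startswith_iff s a).mp h)))]
            push_cast; ring

-- per line: A's word scan equals B's prefix-lookup loop
lemma pv_line (word_list : List String) (line : List Char) (c : Int) :
    word_list.foldl (fun count listItem =>
        if PySem.Chars.startswith line (PySem.Chars.lower listItem.toList)
        then count + 1 else count) c
      = (PySem.List.pyRange 0
            (min (word_list.foldl (fun acc w =>
                if (PySem.Chars.len (PySem.Chars.lower w.toList) : Int) > acc
                then (PySem.Chars.len (PySem.Chars.lower w.toList) : Int) else acc) 0)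
              (PySem.Chars.len line : Int) + 1) 1).foldl
          (fun total l => total
            + (PySem.Dict.counter (word_list.map (fun w => PySem.Chars.lower w.toList))).getD
                (PySem.Chars.slice line none (some l)) 0) c := by
  have hmaxeq : word_list.foldl (fun acc w =>
      if (PySem.Chars.len (PySem.Chars.lower w.toList) : Int) > acc
      then (PySem.Chars.len (PySem.Chars.lower w.toList) : Int) else acc) 0
      = word_list.foldl (fun acc w => max acc (PySem.Chars.len (PySem.Chars.lower w.toList) : Int)) 0 := by
    apply PySem.List.foldl_congr_mem
    intro acc w _
    simp only [max_def]
    split_ifs <;> omega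
  set M : Int := word_list.foldl (fun acc w =>
      if (PySem.Chars.len (PySem.Chars.lower w.toList) : Int) > acc
      then (PySem.Chars.len (PySem.Chars.lower w.toList) : Int) else acc) 0 with hMdef
  obtain ⟨hM0, hMall⟩ := hmaxeq ▸
    PySem.List.le_foldl_max_int word_list (fun w => (PySem.Chars.len (PySem.Chars.lower w.toList) : Int)) 0
  set n : Nat := (min M (PySem.Chars.len line : Int)).toNat with hndef
  have hmin : min M (PySem.Chars.len line : Int) = (n : Int) := by
    have : (0:Int) ≤ min M (PySem.Chars.len line : Int) := le_min hM0 (by simp [PySem.Chars.len_eq])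
    omega
  rw [PySem.List.foldl_if_add_one
    (fun w : String => PySem.Chars.startswith line (PySem.Chars.lower w.toList)) word_list c]
  rw [hmin, PySem.List.foldl_add]
  have hrange : PySem.List.pyRange 0 ((n : Int) + 1) 1
      = List.map (fun k : Nat => (k : Int)) (List.range (n+1)) := by
    rw [PySem.List.pyRange_one]
    have h1 : ((n : Int) + 1 - 0).toNat = n + 1 := by omega
    rw [h1]
    exact List.map_congr_left (fun k _ => zero_add _)
  rw [hrange, List.map_map]
  have hsumand : ∀ k : Nat,
      (PySem.Dict.counter (word_list.map (fun w => PySem.Chars.lower w.toList))).getD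
          (PySem.Chars.slice line none (some (k : Int))) 0
        = (List.count (line.take k)
            (word_list.map (fun w => PySem.Chars.lower w.toList)) : Int) := by
    intro k
    rw [PySem.Dict.getD_counter]
    congr 2
    simp [PySem.Chars.slice_eq_listSlice, PySem.List.slice_to_natCast]
  simp only [Function.comp_def]
  rw [List.map_congr_left (fun (k : Nat) (_ : k ∈ List.range (n+1)) => hsumand k)]
  rw [pv_core (word_list.map (fun w => PySem.Chars.lower w.toList)) line n
    (by
      have : (n : Int) ≤ (PySem.Chars.len line : Int) := by rw [← hmin]; exact min_le_right _ _
      simpa [PySem.Chars.len_eq] using this)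
    (by
      intro w hw hpre
      obtain ⟨v, hv, rfl⟩ := List.mem_map.mp hw
      have h1 : ((PySem.Chars.lower v.toList).length : Int) ≤ M := by
        simpa [PySem.Chars.len_eq] using hMall v hv
      have h2 : (PySem.Chars.lower v.toList).length ≤ line.length := hpre.length_le
      have h3 : ((PySem.Chars.lower v.toList).length : Int) ≤ min M (PySem.Chars.len line : Int) := by
        refine le_min h1 ?_
        simpa [PySem.Chars.len_eq] using (Int.ofNat_le.mpr h2)
      omega)]
  congr 1
  rw [List.countP_map]
  rfl

-- ===== VERDICT (by name: the statement is the Claim_ definition above) =====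
theorem checkInListLines_spec : Claim_equal_checkInListLines := by
  intro word_list request _
  unfold Spec_checkInListLines checkInListLines checkInListLines_alt
  simp only
  rw [PySem.List.foldl_prod_mk
    (f := fun (d : PySem.Dict (List Char) Int) (w : String) =>
      d.insert (PySem.Chars.lower w.toList) (d.getD (PySem.Chars.lower w.toList) 0 + 1))
    (g := fun (acc : Int) (w : String) =>
      if (PySem.Chars.len (PySem.Chars.lower w.toList) : Int) > acc
      then (PySem.Chars.len (PySem.Chars.lower w.toList) : Int) else acc)]
  rw [show word_list.foldl
      (fun (d : PySem.Dict (List Char) Int) (w : String) =>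
        d.insert (PySem.Chars.lower w.toList) (d.getD (PySem.Chars.lower w.toList) 0 + 1))
      PySem.Dict.empty
      = PySem.Dict.counter (word_list.map (fun w => PySem.Chars.lower w.toList)) by
    rw [← PySem.Dict.foldl_insert_getD_add_one_eq_counter, List.foldl_map]]
  apply PySem.List.foldl_congr_mem
  intro acc line _
  exact pv_line word_list (PySem.Chars.strip line) acc
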